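-- pv_equiv track=rewrite | github.com/ashley3schultz/python-notes | jesse.py | jesse
-- ===== SOURCE A (Python) =====
-- def jesse(tickets, p):
--     jesses_place = p
--     jesses_tickets = tickets[p-1]
--     less = 0 # difference of all ticket less than jesse
--     behind = 0 # number of people beind jesse
--     index = 0
--     for their_tickets in tickets:
--         if index < jesses_place:
--             if their_tickets < jesses_tickets:
--                 less += (jesses_tickets - their_tickets)
--         else:
--             if their_tickets < (jesses_tickets - 1):
--                 less += (jesses_tickets - their_tickets - 1)
--             behind += 1
--         index += 1
--     return (len(tickets) * jesses_tickets) - (less + behind)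
-- ===== SOURCE B (Python) =====
-- def _capped_sum(part, cap):
--     # sum of everyone's effective tickets in this group, each capped at `cap`:
--     # walk the sorted group; once a value reaches the cap, everyone left pays the cap
--     total = 0
--     remaining = len(part)
--     for t in sorted(part):
--         if t >= cap:
--             break
--         total += t
--         remaining -= 1
--     return total + cap * remaining
--
-- def jesse(tickets, p):
--     j = tickets[p - 1]
--     return _capped_sum(tickets[:p], j) + _capped_sum(tickets[p:], j - 1)
-- ===== Notes on version B (the rewrite author's own statement) =====
-- stated objective: alternative
-- what changed: Instead of one indexed pass maintaining 'less'/'behind' deficit accumulators subtracted from len(tickets)*J, B splits the list at p and computes each group's capped total by sorting it and scanning until the cap, charging the cap to everyone remaining; Pre_ excludes negative p, where the 1-based position is only reachable via Python's negative-index wraparound and A's front/back split degenerates (everyone counts as behind) -- a corner no caller would specify, on which B's slice-from-the-end reading is equally defensible.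
-- outside the precondition, e.g. on jesse([3, 1], -1): A returns 3, B returns 4
import Mathlib
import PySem

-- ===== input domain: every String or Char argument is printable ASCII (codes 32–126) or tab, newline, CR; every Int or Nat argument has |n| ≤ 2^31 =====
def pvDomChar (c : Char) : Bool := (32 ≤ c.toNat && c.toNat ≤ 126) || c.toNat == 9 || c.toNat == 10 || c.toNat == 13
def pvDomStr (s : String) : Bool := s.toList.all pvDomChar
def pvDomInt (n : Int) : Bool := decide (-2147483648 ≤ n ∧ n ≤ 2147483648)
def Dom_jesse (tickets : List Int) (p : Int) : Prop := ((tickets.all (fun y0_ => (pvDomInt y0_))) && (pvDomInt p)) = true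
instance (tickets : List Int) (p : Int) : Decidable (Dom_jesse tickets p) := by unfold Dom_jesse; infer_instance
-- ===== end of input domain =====

-- B splits the list at p and totals each group by sorting and scanning up to the cap (alternative decomposition).

-- ===== PORT A =====
-- the for-loop of A, carrying (less, behind, index) exactly as A does
def jesseLoop (p J : Int) : List Int → Int → Int → Int → Int × Int
  | [], less, behind, _ => (less, behind)
  | t :: ts, less, behind, index =>
    if index < p then
      jesseLoop p J ts (if t < J then less + (J - t) else less) behind (index + 1)
    else
      jesseLoop p J ts (if t < J - 1 then less + (J - t - 1) else less) (behind + 1) (index + 1)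

def jesse (tickets : List Int) (p : Int) : Int :=
  let J := (PySem.List.pyGet? tickets (p - 1)).getD 0  -- tickets[p-1]; Pre_ excludes the IndexError
  let r := jesseLoop p J tickets 0 0 0
  (tickets.length : Int) * J - (r.1 + r.2)

-- ===== PORT B =====
-- B's loop over the sorted group: stop at the first value ≥ cap (Python's break)
def cappedLoop (cap : Int) : List Int → Int → Int → Int × Int
  | [], total, remaining => (total, remaining)
  | t :: ts, total, remaining =>
    if t ≥ cap then (total, remaining)
    else cappedLoop cap ts (total + t) (remaining - 1)

def cappedSum (part : List Int) (cap : Int) : Int :=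
  let r := cappedLoop cap (PySem.List.sorted part (fun x => x) false) 0 (part.length : Int)
  r.1 + cap * r.2

def jesse_alt (tickets : List Int) (p : Int) : Int :=
  let J := (PySem.List.pyGet? tickets (p - 1)).getD 0  -- tickets[p-1]; Pre_ excludes the IndexError
  cappedSum (PySem.List.slice tickets none (some p)) J
    + cappedSum (PySem.List.slice tickets (some p) none) (J - 1)

-- ===== PRECONDITION & SPEC =====
-- Pre_ requires tickets[p-1] not to raise IndexError, and excludes negative p, on which A still
-- returns: there the 1-based position is only reachable through Python's negative-index wraparound
-- and the program's front/back split degenerates (index < p never holds) — a corner no caller of a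
-- 1-based position would specify, where B's slice-from-the-end reading is as defensible as A's.
def Pre_jesse (tickets : List Int) (p : Int) : Prop :=
  PySem.Raise.InRange tickets.length (p - 1) ∧ 0 ≤ p
instance (tickets : List Int) (p : Int) : Decidable (Pre_jesse tickets p) := by
  unfold Pre_jesse; infer_instance

def pvWitness_jesse : List Int × Int := ([3, 1, 4, 2], 2)

def Spec_jesse (tickets : List Int) (p : Int) (out : Int) : Prop := out = jesse_alt tickets p
instance (tickets : List Int) (p : Int) (out : Int) : Decidable (Spec_jesse tickets p out) := by unfold Spec_jesse; infer_instance

-- ===== CLAIM (what is proved, stated in full; the proofs are below) =====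
def Claim_equal_jesse : Prop := ∀ (tickets : List Int) (p : Int), Dom_jesse tickets p → Pre_jesse tickets p → Spec_jesse tickets p (jesse tickets p)

-- ===== LEMMAS AND PROOFS =====

-- B's sorted scan computes the sum of min over the group
theorem cappedLoop_val (cap : Int) : ∀ (l : List Int), l.Pairwise (· ≤ ·) →
    ∀ (total remaining : Int),
    (cappedLoop cap l total remaining).1 + cap * (cappedLoop cap l total remaining).2
    = total + cap * (remaining - l.length) + (l.map (fun t => min t cap)).sum := by
  intro l
  induction l with
  | nil => intro _ total remaining; simp [cappedLoop]
  | cons t ts ih =>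
    intro hp total remaining
    rcases List.pairwise_cons.mp hp with ⟨hle, hts⟩
    by_cases h : t ≥ cap
    · have hmap : ts.map (fun t => min t cap) = ts.map (fun _ => cap) := by
        apply List.map_congr_left
        intro x hx
        exact min_eq_right (le_trans h (hle x hx))
      simp only [cappedLoop, if_pos h, List.map_cons, List.sum_cons, List.length_cons, hmap,
        List.map_const', List.sum_replicate, min_eq_right h]
      push_cast
      ring
    · have H := ih hts (total + t) (remaining - 1)
      simp only [cappedLoop, if_neg h, List.map_cons, List.sum_cons, List.length_cons,
        min_eq_left (le_of_not_ge h)]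
      rw [H]
      push_cast
      ring

theorem cappedSum_val (part : List Int) (cap : Int) :
    cappedSum part cap = (part.map (fun t => min t cap)).sum := by
  unfold cappedSum
  have hperm : (PySem.List.sorted part (fun x => x) false).Perm part :=
    PySem.List.sorted_perm part (fun x => x) false
  rw [cappedLoop_val cap _ (PySem.List.sorted_pairwise part (fun x => x)) 0 (part.length : Int)]
  rw [hperm.length_eq, (hperm.map (fun t => min t cap)).sum_eq]
  ring

-- the value A's loop contributes, expressed as split capped sums (split at (p - i).toNat)
theorem jesseLoop_val (p J : Int) : ∀ (ts : List Int) (less behind i : Int),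
    (ts.length : Int) * J
      - ((jesseLoop p J ts less behind i).1 + (jesseLoop p J ts less behind i).2)
    = ((ts.take (p - i).toNat).map (fun t => min t J)).sum
      + ((ts.drop (p - i).toNat).map (fun t => min t (J - 1))).sum
      - (less + behind) := by
  intro ts
  induction ts with
  | nil => intro less behind i; simp [jesseLoop]
  | cons t ts ih =>
    intro less behind i
    by_cases h : i < p
    · have hk : (p - i).toNat = (p - (i + 1)).toNat + 1 := by omega
      rw [hk]
      simp only [jesseLoop, if_pos h, List.take_succ_cons, List.drop_succ_cons,
        List.map_cons, List.sum_cons, List.length_cons]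
      have H := ih (if t < J then less + (J - t) else less) behind (i + 1)
      push_cast
      rw [add_mul, one_mul]
      generalize hM : (ts.length : Int) * J = M at H ⊢
      split_ifs at H ⊢ with h2 <;> omega
    · have hk : (p - i).toNat = 0 := by omega
      have hk' : (p - (i + 1)).toNat = 0 := by omega
      rw [hk]
      simp only [jesseLoop, if_neg h, List.take_zero, List.drop_zero,
        List.map_nil, List.sum_nil, List.map_cons, List.sum_cons, List.length_cons]
      have H := ih (if t < J - 1 then less + (J - t - 1) else less) (behind + 1) (i + 1)
      rw [hk'] at H
      simp only [List.take_zero, List.drop_zero, List.map_nil, List.sum_nil] at H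
      push_cast
      rw [add_mul, one_mul]
      generalize hM : (ts.length : Int) * J = M at H ⊢
      split_ifs at H ⊢ with h2 <;> omega

-- ===== VERDICT (by name: the statement is the Claim_ definition above) =====
theorem jesse_spec : Claim_equal_jesse := by
  intro tickets p _ hpre
  unfold Spec_jesse jesse jesse_alt
  dsimp only
  rw [cappedSum_val, cappedSum_val,
    PySem.List.slice_to _ hpre.2, PySem.List.slice_from _ hpre.2]
  have hn : p.toNat = (p - 0).toNat := by omega
  rw [hn, jesseLoop_val p _ tickets 0 0 0]
  ring
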